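-- pv_equiv track=rewrite | github.com/MurakamiHonami/my_first_repository | test/solo_mahjong_1.py | is_chinitsu
-- ===== SOURCE A (Python) =====
-- def is_chinitsu(tehai):
--     suits = ['m', 'p', 's']
--     for ji in character_tiles:
--         for tile in tehai:
--             if ji==tile:
--                 return False
--     for suit in suits:
--         cnt=0
--         for tile in tehai:
--             if tile[1] == suit:
--                 cnt+=1
--         if cnt==len(tehai):
--             return True
--     return False
--
-- character_tiles=["東", "南", "西", "北", "白", "発", "中"]
-- ===== SOURCE B (Python) =====
-- character_tiles=["東", "南", "西", "北", "白", "発", "中"]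
--
-- def is_chinitsu(tehai):
--     if any(t in character_tiles for t in tehai):
--         return False
--     suits = {t[1] for t in tehai}
--     return len(suits) <= 1 and suits <= {'m', 'p', 's'}
-- ===== Notes on version B (the rewrite author's own statement) =====
-- stated objective: simpler
-- what changed: Replaces A's three per-suit counting scans with a single pass that collects the set of distinct suit characters, then checks the set has at most one element and is a subset of {'m','p','s'}.
import Mathlib
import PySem

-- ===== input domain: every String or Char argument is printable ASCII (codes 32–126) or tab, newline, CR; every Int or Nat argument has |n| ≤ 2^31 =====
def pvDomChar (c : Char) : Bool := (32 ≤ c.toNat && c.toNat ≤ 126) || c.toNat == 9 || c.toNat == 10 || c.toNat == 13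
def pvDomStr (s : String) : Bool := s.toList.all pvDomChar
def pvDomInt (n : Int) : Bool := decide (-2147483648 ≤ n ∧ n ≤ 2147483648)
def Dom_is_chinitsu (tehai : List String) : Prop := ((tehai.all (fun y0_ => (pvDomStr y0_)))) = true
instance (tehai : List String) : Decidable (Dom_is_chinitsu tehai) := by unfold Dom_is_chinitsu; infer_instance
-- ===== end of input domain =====

-- B replaces A's three per-suit counting scans by one pass collecting the set of
-- distinct suit characters plus a size/subset check (objective: simpler).

-- ===== PORT A =====
def character_tiles : List String := ["東", "南", "西", "北", "白", "発", "中"]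

def is_chinitsu (tehai : List String) : Bool :=
  -- for ji in character_tiles: for tile in tehai: if ji==tile: return False
  if character_tiles.any (fun ji => tehai.any (fun tile => ji == tile)) then false
  else
    -- for suit in suits: cnt = …; if cnt==len(tehai): return True / return False
    (['m', 'p', 's'] : List Char).any (fun suit =>
      (tehai.foldl
        (fun cnt tile => if PySem.Str.pyGet? tile 1 == some suit then cnt + 1 else cnt)
        (0 : Int)) == (tehai.length : Int))

-- ===== PORT B =====
def is_chinitsu_alt (tehai : List String) : Bool :=
  if tehai.any (fun t => character_tiles.any (fun ji => t == ji)) then false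
  else
    let suits : PySem.Set (Option Char) :=
      PySem.Set.ofList (tehai.map (fun t => PySem.Str.pyGet? t 1))
    decide (PySem.Set.len suits ≤ 1) &&
      PySem.Set.issubset suits [some 'm', some 'p', some 's']

-- ===== PRECONDITION & SPEC =====
-- Pre_ excludes exactly the hands containing a tile of length < 2 (within the ASCII
-- domain no tile is an honor tile, so tile[1] raises IndexError there in A and in B).
def Pre_is_chinitsu (tehai : List String) : Prop := ∀ t ∈ tehai, 2 ≤ t.length
instance (tehai : List String) : Decidable (Pre_is_chinitsu tehai) := by
  unfold Pre_is_chinitsu; infer_instance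

def pvWitness_is_chinitsu : List String := ["1m", "2m", "3m"]

def Spec_is_chinitsu (tehai : List String) (out : Bool) : Prop := out = is_chinitsu_alt tehai
instance (tehai : List String) (out : Bool) : Decidable (Spec_is_chinitsu tehai out) := by unfold Spec_is_chinitsu; infer_instance

-- ===== CLAIM (what is proved, stated in full; the proofs are below) =====
def Claim_equal_is_chinitsu : Prop := ∀ (tehai : List String), Dom_is_chinitsu tehai → Pre_is_chinitsu tehai → Spec_is_chinitsu tehai (is_chinitsu tehai)

-- ===== LEMMAS AND PROOFS =====

-- the two honor-tile guards test the same existential, with the loops swapped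
lemma any_swap (l1 l2 : List String) :
    (l1.any fun a => l2.any fun b => a == b) = (l2.any fun b => l1.any fun a => b == a) := by
  rw [Bool.eq_iff_iff]
  simp only [List.any_eq_true, beq_iff_eq]
  constructor <;> rintro ⟨a, ha, b, hb, h⟩ <;> exact ⟨b, hb, a, ha, h.symm⟩

-- A's counting loop computes the count of the mapped suit characters
lemma count_foldl (l : List String) (v : Option Char) (acc : Int) :
    l.foldl (fun cnt t => if PySem.Str.pyGet? t 1 == v then cnt + 1 else cnt) acc
      = acc + ((l.map (fun t => PySem.Str.pyGet? t 1)).count v : Int) := by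
  induction l generalizing acc with
  | nil => simp
  | cons h t ih =>
    simp only [List.foldl_cons, List.map_cons, List.count_cons, ih]
    split_ifs <;> push_cast <;> ring

-- a Nodup list has length ≤ 1 iff all its members coincide
lemma len_le_one_iff {α : Type} (s : List α) (hnd : s.Nodup) :
    s.length ≤ 1 ↔ ∀ x ∈ s, ∀ y ∈ s, x = y := by
  match s with
  | [] => simp
  | [a] => simp
  | a :: b :: rest =>
    simp only [List.length_cons]
    constructor
    · omega
    · intro h
      have hab : a = b := h a (by simp) b (by simp)
      have ha : a ∉ b :: rest := (List.nodup_cons.mp hnd).1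
      exact absurd hab (fun hh => ha (by simp [hh]))

theorem is_chinitsu_spec : Claim_equal_is_chinitsu := by
  intro tehai _ _
  unfold Spec_is_chinitsu is_chinitsu is_chinitsu_alt
  rw [any_swap]
  by_cases hguard :
      (tehai.any fun t => character_tiles.any fun ji => t == ji) = true
  · simp [hguard]
  · simp only [Bool.not_eq_true] at hguard
    simp only [hguard, Bool.false_eq_true, if_false]
    obtain ⟨cs, hcs⟩ : ∃ cs, List.map (fun t => PySem.Str.pyGet? t 1) tehai = cs := ⟨_, rfl⟩
    have hlen : cs.length = tehai.length := by rw [← hcs]; simp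
    have hset := PySem.Set.nodup_ofList (xs := cs)
    simp only [count_foldl, zero_add, hcs]
    rw [Bool.eq_iff_iff]
    simp only [List.any_eq_true, beq_iff_eq, ← hlen, Nat.cast_inj, List.count_eq_length,
      Bool.and_eq_true, decide_eq_true_eq, PySem.Set.issubset_iff,
      PySem.Set.len, PySem.Set.mem_ofList, Nat.cast_le_one, len_le_one_iff _ hset]
    constructor
    · rintro ⟨suit, hsuit, hall⟩
      refine ⟨fun x hx y hy => ?_, fun x hx => ?_⟩
      · rw [← hall x hx, ← hall y hy]
      · rw [← hall x hx]; fin_cases hsuit <;> simp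
    · rintro ⟨heq, hmem⟩
      cases hcs2 : cs with
      | nil => exact ⟨'m', by simp, by simp⟩
      | cons c rest =>
        have hc : c ∈ cs := by rw [hcs2]; exact List.mem_cons_self
        have h3 := hmem c hc
        simp only [List.mem_cons, List.not_mem_nil, or_false] at h3
        have hall : ∀ b ∈ cs, b = c := fun b hb => heq b hb c hc
        rcases h3 with h | h | h
        · exact ⟨'m', by simp, fun b hb => by rw [hall b (hcs2 ▸ hb), h]⟩
        · exact ⟨'p', by simp, fun b hb => by rw [hall b (hcs2 ▸ hb), h]⟩
        · exact ⟨'s', by simp, fun b hb => by rw [hall b (hcs2 ▸ hb), h]⟩
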